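-- pv_equiv track=rewrite | github.com/separatrixxx/aviahack5 | generate_tasks/tools.py | min_time_and_bus
-- ===== SOURCE A (Python) =====
-- def min_time_and_bus(dict_point_times,av_bus):
--   min_time=10000000000000000
--   res=[]
--   for i,item in av_bus.items():
--     for j in item:
--       if min_time>j[1] + dict_point_times[i]:
--         min_time=j[1] + dict_point_times[i]
--         res=[i,j[0],min_time,dict_point_times[i]]
--   return res
-- ===== SOURCE B (Python) =====
-- def min_time_and_bus(dict_point_times, av_bus):
--     candidates = [(j[1] + dict_point_times[i], i, j[0], dict_point_times[i])
--                   for i, item in av_bus.items() for j in item]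
--     if not candidates:
--         return []
--     candidates.sort(key=lambda c: c[0])
--     best = candidates[0]
--     return [best[1], best[2], best[0], best[3]]
-- ===== Notes on version B (the rewrite author's own statement) =====
-- stated objective: alternative
-- what changed: Replaced the nested running-minimum scan with building a flat candidate list, stably sorting it by total time, and taking the first element.
import Mathlib
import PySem

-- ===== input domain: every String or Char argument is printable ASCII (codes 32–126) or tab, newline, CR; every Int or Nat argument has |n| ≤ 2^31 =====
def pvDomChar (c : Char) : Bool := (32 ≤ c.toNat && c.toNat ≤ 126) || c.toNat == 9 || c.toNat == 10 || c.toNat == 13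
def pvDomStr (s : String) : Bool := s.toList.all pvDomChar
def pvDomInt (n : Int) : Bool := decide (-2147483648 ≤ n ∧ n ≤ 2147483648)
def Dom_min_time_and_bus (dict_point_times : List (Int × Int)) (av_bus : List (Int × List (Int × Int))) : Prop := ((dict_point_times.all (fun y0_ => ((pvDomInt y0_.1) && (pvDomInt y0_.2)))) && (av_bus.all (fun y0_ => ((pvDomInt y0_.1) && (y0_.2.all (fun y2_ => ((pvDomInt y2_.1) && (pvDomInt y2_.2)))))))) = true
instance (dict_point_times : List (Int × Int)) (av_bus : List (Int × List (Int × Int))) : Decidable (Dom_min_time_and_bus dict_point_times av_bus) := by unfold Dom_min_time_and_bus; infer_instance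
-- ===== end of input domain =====

-- B replaces A's nested running-minimum scan by flat candidates + stable sort by total + first element (objective: alternative).

-- ===== PORT A =====
-- dict_point_times[i]; Pre_ excludes the KeyError inputs, so the default 0 is never A's value
def dptGet (dict_point_times : List (Int × Int)) (i : Int) : Int :=
  (PySem.Dict.mk dict_point_times).getD i 0

def min_time_and_bus (dict_point_times : List (Int × Int)) (av_bus : List (Int × List (Int × Int))) : List Int :=
  (av_bus.foldl (fun (st : Int × List Int) p =>
      p.2.foldl (fun (st : Int × List Int) j =>
        if st.1 > j.2 + dptGet dict_point_times p.1 then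
          (j.2 + dptGet dict_point_times p.1,
           [p.1, j.1, j.2 + dptGet dict_point_times p.1, dptGet dict_point_times p.1])
        else st) st)
    ((10000000000000000 : Int), ([] : List Int))).2

-- ===== PORT B =====
def min_time_and_bus_alt (dict_point_times : List (Int × Int)) (av_bus : List (Int × List (Int × Int))) : List Int :=
  let candidates : List (Int × Int × Int × Int) :=
    av_bus.flatMap (fun p => p.2.map (fun j =>
      (j.2 + dptGet dict_point_times p.1, p.1, j.1, dptGet dict_point_times p.1)))
  match PySem.List.sorted candidates (fun c => c.1) false with
  | [] => []
  | best :: _ => [best.2.1, best.2.2.1, best.1, best.2.2.2]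

-- ===== PRECONDITION & SPEC =====
-- Pre_ excludes exactly the KeyError inputs: some av_bus key with a nonempty bus list is absent from dict_point_times
def Pre_min_time_and_bus (dict_point_times : List (Int × Int)) (av_bus : List (Int × List (Int × Int))) : Prop :=
  (av_bus.all (fun p => p.2.isEmpty || (PySem.Dict.mk dict_point_times).contains p.1)) = true
instance (dict_point_times : List (Int × Int)) (av_bus : List (Int × List (Int × Int))) : Decidable (Pre_min_time_and_bus dict_point_times av_bus) := by unfold Pre_min_time_and_bus; infer_instance

def pvWitness_min_time_and_bus : (List (Int × Int)) × (List (Int × List (Int × Int))) :=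
  ([(1, 5), (2, 7)], [(1, [(3, 4), (6, 1)]), (2, [(9, 0)])])

def Spec_min_time_and_bus (dict_point_times : List (Int × Int)) (av_bus : List (Int × List (Int × Int))) (out : List Int) : Prop := out = min_time_and_bus_alt dict_point_times av_bus
instance (dict_point_times : List (Int × Int)) (av_bus : List (Int × List (Int × Int))) (out : List Int) : Decidable (Spec_min_time_and_bus dict_point_times av_bus out) := by unfold Spec_min_time_and_bus; infer_instance

-- ===== CLAIM (what is proved, stated in full; the proofs are below) =====
def Claim_equal_min_time_and_bus : Prop := ∀ (dict_point_times : List (Int × Int)) (av_bus : List (Int × List (Int × Int))), Dom_min_time_and_bus dict_point_times av_bus → Pre_min_time_and_bus dict_point_times av_bus → Spec_min_time_and_bus dict_point_times av_bus (min_time_and_bus dict_point_times av_bus)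

-- ===== LEMMAS AND PROOFS =====

-- abbreviations for the proof only
def pvStep (st : Int × List Int) (c : Int × Int × Int × Int) : Int × List Int :=
  if st.1 > c.1 then (c.1, [c.2.1, c.2.2.1, c.1, c.2.2.2]) else st

def pvMinBy (b c : Int × Int × Int × Int) : Int × Int × Int × Int :=
  if c.1 < b.1 then c else b

def pvFmt (c : Int × Int × Int × Int) : List Int := [c.2.1, c.2.2.1, c.1, c.2.2.2]

-- foldl over a flatMap is the nested foldl
theorem pv_foldl_flatMap {α β σ : Type} (g : α → List β) (f : σ → β → σ) :
    ∀ (l : List α) (s : σ), (l.flatMap g).foldl f s = l.foldl (fun s p => (g p).foldl f s) s := by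
  intro l
  induction l with
  | nil => intro s; rfl
  | cons p l ih => intro s; simp [List.flatMap_cons, List.foldl_append, ih]

-- A's scan after the first hit is the running first-minimum
theorem pv_scan_eq_minBy : ∀ (cs : List (Int × Int × Int × Int)) (b : Int × Int × Int × Int),
    cs.foldl pvStep (b.1, pvFmt b) = ((cs.foldl pvMinBy b).1, pvFmt (cs.foldl pvMinBy b)) := by
  intro cs
  induction cs with
  | nil => intro b; rfl
  | cons c cs ih =>
    intro b
    have h : pvStep (b.1, pvFmt b) c = ((pvMinBy b c).1, pvFmt (pvMinBy b c)) := by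
      simp only [pvStep, pvMinBy, pvFmt]
      by_cases h : c.1 < b.1
      · simp [h]
      · simp [h]
    simp only [List.foldl_cons, h, ih]

-- head of the stable insertion sort is the running first-minimum
theorem pv_head_insertBy (bef : (Int × Int × Int × Int) → (Int × Int × Int × Int) → Bool) :
    ∀ (cs : List (Int × Int × Int × Int)) (h : Int × Int × Int × Int) (t : List (Int × Int × Int × Int)),
    ∃ t', cs.foldl (fun acc x => PySem.List.insertBy bef x acc) (h :: t)
        = (cs.foldl (fun b x => if bef x b then x else b) h) :: t' := by
  intro cs
  induction cs with
  | nil => intro h t; exact ⟨t, rfl⟩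
  | cons x cs ih =>
    intro h t
    by_cases hb : bef x h
    · simpa [PySem.List.insertBy, hb] using ih x (h :: t)
    · simpa [PySem.List.insertBy, hb] using ih h (PySem.List.insertBy bef x t)

theorem pv_dptGet_bound (dpt : List (Int × Int))
    (hd : dpt.all (fun y => pvDomInt y.1 && pvDomInt y.2) = true) (i : Int) :
    -2147483648 ≤ dptGet dpt i ∧ dptGet dpt i ≤ 2147483648 := by
  induction dpt with
  | nil => simp [dptGet, PySem.Dict.getD, PySem.Dict.get?]
  | cons kv dpt ih =>
    obtain ⟨k, v⟩ := kv
    simp only [List.all_cons, Bool.and_eq_true, pvDomInt, decide_eq_true_eq] at hd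
    have h1 := hd.1.2
    have h2 := ih hd.2
    by_cases he : (k == i) = true
    · simp only [dptGet, PySem.Dict.getD_eq_get?_getD, PySem.Dict.get?_mk_cons, he, if_true,
        Option.getD_some]
      exact h1
    · simp only [dptGet, PySem.Dict.getD_eq_get?_getD] at h2
      simp only [dptGet, PySem.Dict.getD_eq_get?_getD, PySem.Dict.get?_mk_cons, he]
      exact h2

theorem pv_minBy_fun :
    (fun (b x : Int × Int × Int × Int) => if (fun a b : Int × Int × Int × Int => decide (a.1 < b.1)) x b then x else b) = pvMinBy := by
  funext b x
  simp [pvMinBy]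

theorem min_time_and_bus_eq (dict_point_times : List (Int × Int)) (av_bus : List (Int × List (Int × Int)))
    (hdom : Dom_min_time_and_bus dict_point_times av_bus) :
    min_time_and_bus dict_point_times av_bus = min_time_and_bus_alt dict_point_times av_bus := by
  have hA : min_time_and_bus dict_point_times av_bus =
      ((av_bus.flatMap (fun p => p.2.map (fun j =>
        (j.2 + dptGet dict_point_times p.1, p.1, j.1, dptGet dict_point_times p.1)))).foldl
        pvStep ((10000000000000000 : Int), ([] : List Int))).2 := by
    rw [pv_foldl_flatMap]
    simp only [List.foldl_map]
    rfl
  rw [hA]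
  unfold min_time_and_bus_alt
  generalize hcs : av_bus.flatMap (fun p => p.2.map (fun j =>
      (j.2 + dptGet dict_point_times p.1, p.1, j.1, dptGet dict_point_times p.1))) = cands
  cases cands with
  | nil => rfl
  | cons c cs =>
    -- the head candidate's total is below A's sentinel 10^16 (Dom bounds)
    have hc : c ∈ av_bus.flatMap (fun p => p.2.map (fun j =>
        (j.2 + dptGet dict_point_times p.1, p.1, j.1, dptGet dict_point_times p.1))) := by
      rw [hcs]; exact List.mem_cons_self
    have hbound : (10000000000000000 : Int) > c.1 := by
      rw [List.mem_flatMap] at hc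
      obtain ⟨p, hp, hcp⟩ := hc
      rw [List.mem_map] at hcp
      obtain ⟨j, hj, rfl⟩ := hcp
      simp only [Dom_min_time_and_bus, Bool.and_eq_true, List.all_eq_true] at hdom
      have hd := pv_dptGet_bound dict_point_times (by
        rw [List.all_eq_true]
        intro x hx
        rw [Bool.and_eq_true]
        exact hdom.1 x hx) p.1
      have hjv := ((hdom.2 p hp).2 j hj).2
      simp only [pvDomInt, decide_eq_true_eq] at hjv
      show (10000000000000000 : Int) > j.2 + dptGet dict_point_times p.1
      omega
    -- A's side: first step takes c, then the scan is the running first-minimum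
    have hstep : pvStep ((10000000000000000 : Int), ([] : List Int)) c = (c.1, pvFmt c) := by
      simp [pvStep, pvFmt, hbound]
    have hAside : ((c :: cs).foldl pvStep ((10000000000000000 : Int), ([] : List Int))).2
        = pvFmt (cs.foldl pvMinBy c) := by
      rw [List.foldl_cons, hstep, pv_scan_eq_minBy]
    -- B's side: the stable sort's head is the same running first-minimum
    have hBside : ∃ t', PySem.List.sorted (c :: cs) (fun c => c.1) false
        = (cs.foldl pvMinBy c) :: t' := by
      rw [PySem.List.sorted_eq_foldl_insertBy, List.foldl_cons]
      have h0 : PySem.List.insertBy (fun a b : Int × Int × Int × Int => decide (a.1 < b.1)) c []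
          = [c] := by simp [PySem.List.insertBy]
      rw [h0]
      have := pv_head_insertBy (fun a b : Int × Int × Int × Int => decide (a.1 < b.1)) cs c []
      rw [pv_minBy_fun] at this
      exact this
    obtain ⟨t', ht'⟩ := hBside
    rw [hAside]
    simp only [ht', pvFmt]

-- ===== VERDICT (by name: the statement is the Claim_ definition above) =====
theorem min_time_and_bus_spec : Claim_equal_min_time_and_bus := by
  intro dpt av hdom _
  exact min_time_and_bus_eq dpt av hdom
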